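-- pv_equiv track=rewrite | github.com/Midhilesh4890/Leetcode-Problems | pipes_water.py | find_highest_water_tower
-- ===== SOURCE A (Python) =====
-- from collections import deque
--
-- def find_highest_water_tower(heights, town1, town2):
--     m, n = len(heights), len(heights[0])
--
--     visited_from_town1 = [[False] * n for _ in range(m)]
--     visited_from_town2 = [[False] * n for _ in range(m)]
--
--     directions = [(-1, 0), (1, 0), (0, -1), (0, 1)]
--
--     def bfs(start, visited):
--         queue = deque([start])
--         r0, c0 = start
--         visited[r0][c0] = True
--
--         while queue:
--             r, c = queue.popleft()
--             for dr, dc in directions: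
--                 nr, nc = r + dr, c + dc
--                 if 0 <= nr < m and 0 <= nc < n and not visited[nr][nc]:
--                     # Note: >= instead of <=
--                     if heights[nr][nc] >= heights[r][c]:
--                         visited[nr][nc] = True
--                         queue.append((nr, nc))
--
--     # 1) BFS from each town allowing movement to neighbors of equal/greater height
--     bfs(tuple(town1), visited_from_town1)
--     bfs(tuple(town2), visited_from_town2)
--
--     # 2) Find the highest cell that both BFS traversals could reach
--     max_height = -1
--     best_location = None
--
--     for i in range(m):
--         for j in range(n):
--             if visited_from_town1[i][j] and visited_from_town2[i][j]:
--                 if heights[i][j] > max_height: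
--                     max_height = heights[i][j]
--                     best_location = [i, j]
--
--     return best_location
-- ===== SOURCE B (Python) =====
-- def find_highest_water_tower(heights, town1, town2):
--     m, n = len(heights), len(heights[0])
--
--     def reachable(town):
--         # recursive depth-first flood fill (call stack instead of a BFS queue),
--         # marking each cell on entry
--         visited = [[False] * n for _ in range(m)]
--
--         def dfs(r, c):
--             visited[r][c] = True
--             for nr, nc in ((r - 1, c), (r + 1, c), (r, c - 1), (r, c + 1)):
--                 if 0 <= nr < m and 0 <= nc < n and not visited[nr][nc] \
--                         and heights[nr][nc] >= heights[r][c]: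
--                     dfs(nr, nc)
--
--         r0, c0 = town
--         dfs(r0, c0)
--         return visited
--
--     visited1 = reachable(town1)
--     visited2 = reachable(town2)
--
--     max_height = -1
--     best_location = None
--     for i in range(m):
--         for j in range(n):
--             if visited1[i][j] and visited2[i][j] and heights[i][j] > max_height:
--                 max_height = heights[i][j]
--                 best_location = [i, j]
--     return best_location
-- ===== Notes on version B (the rewrite author's own statement) =====
-- stated objective: alternative
-- what changed: Replaces A's iterative breadth-first flood fill (explicit FIFO deque, mark-on-enqueue) by a recursive depth-first flood fill (no worklist container: a recursive dfs helper marks its cell on entry and recurses into eligible neighbours), and fuses the final scan's nested membership tests into one combined condition.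
-- outside the precondition, e.g. on find_highest_water_tower([[5, 0], [1]], [0, 0], [0, 0]): A returns [0, 0], B returns [0, 0]; on find_highest_water_tower([[1], [2, 3]], [0, 0], [1, 0]): A returns [1, 0], B returns [1, 0]
import Mathlib
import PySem

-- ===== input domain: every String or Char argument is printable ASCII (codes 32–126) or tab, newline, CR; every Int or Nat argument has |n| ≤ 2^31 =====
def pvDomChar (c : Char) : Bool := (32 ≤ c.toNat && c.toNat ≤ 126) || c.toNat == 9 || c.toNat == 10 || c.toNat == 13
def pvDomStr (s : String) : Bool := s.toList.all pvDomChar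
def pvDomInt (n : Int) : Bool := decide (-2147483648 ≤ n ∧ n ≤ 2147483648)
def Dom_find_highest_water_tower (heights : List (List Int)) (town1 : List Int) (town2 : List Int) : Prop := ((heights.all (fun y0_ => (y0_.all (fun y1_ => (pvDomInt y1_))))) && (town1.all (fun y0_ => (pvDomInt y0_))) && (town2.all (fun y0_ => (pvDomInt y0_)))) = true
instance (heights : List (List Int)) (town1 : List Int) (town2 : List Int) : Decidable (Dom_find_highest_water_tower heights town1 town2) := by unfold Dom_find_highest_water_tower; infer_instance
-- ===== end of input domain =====

-- B replaces A's iterative breadth-first flood fill (explicit FIFO deque) by a recursive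
-- depth-first flood fill with no worklist container (mark on entry, recurse into eligible
-- neighbours); objective: alternative (different decomposition, same exact return value).

-- ===== PORT A =====
-- A-side helpers.  heights[r][c]; exact for every access A performs under Pre_ (indices in range).
def pvHAt (heights : List (List Int)) (r c : Int) : Int :=
  PySem.List.pyGetD (PySem.List.pyGetD heights r []) c 0

-- visited[r][c] (a boolean grid); exact for in-range indices (all accesses under Pre_).
def pvVAt (v : List (List Bool)) (r c : Int) : Bool :=
  PySem.List.pyGetD (PySem.List.pyGetD v r []) c false

-- visited[r][c] = True; exact for in-range indices (all writes under Pre_).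
def pvVSet (v : List (List Bool)) (r c : Int) : List (List Bool) :=
  PySem.List.pySetD v r (PySem.List.pySetD (PySem.List.pyGetD v r []) c true)

def pvDirs : List (Int × Int) := [(-1, 0), (1, 0), (0, -1), (0, 1)]

-- body of A's inner `for dr, dc in directions` loop
def pvRelax (heights : List (List Int)) (m n r c : Int)
    (st : List (List Bool) × List (Int × Int)) (d : Int × Int) :
    List (List Bool) × List (Int × Int) :=
  let nr := r + d.1
  let nc := c + d.2
  if 0 ≤ nr ∧ nr < m ∧ 0 ≤ nc ∧ nc < n ∧ pvVAt st.1 nr nc = false then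
    if pvHAt heights nr nc ≥ pvHAt heights r c then
      (pvVSet st.1 nr nc, st.2 ++ [(nr, nc)])
    else st
  else st

def pvBfsStep (heights : List (List Int)) (m n r c : Int)
    (st : List (List Bool) × List (Int × Int)) : List (List Bool) × List (Int × Int) :=
  pvDirs.foldl (pvRelax heights m n r c) st

-- A's `while queue` loop.  Every dequeue matches one enqueue and every enqueue after the first
-- marks a previously unmarked cell, so at most m*n iterations ever run: fuel m*n is exact under
-- Pre_ (proved via the invariant queue.length + #unmarked ≤ fuel in the lemmas below).
def pvBfsLoop (heights : List (List Int)) (m n : Int) :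
    Nat → List (Int × Int) → List (List Bool) → List (List Bool)
  | _, [], v => v
  | 0, _ :: _, v => v
  | fuel + 1, (r, c) :: rest, v =>
    let st := pvBfsStep heights m n r c (v, rest)
    pvBfsLoop heights m n fuel st.2 st.1

def pvBfs (heights : List (List Int)) (m n : Int) (start : Int × Int)
    (visited : List (List Bool)) : List (List Bool) :=
  pvBfsLoop heights m n (m.toNat * n.toNat) [start] (pvVSet visited start.1 start.2)

-- A's final double scan (state = (max_height, best_location))
def pvScanA (heights : List (List Int)) (m n : Int) (v1 v2 : List (List Bool)) :
    Int × Option (List Int) :=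
  (PySem.List.pyRange 0 m 1).foldl (fun st i =>
    (PySem.List.pyRange 0 n 1).foldl (fun st j =>
      if pvVAt v1 i j = true ∧ pvVAt v2 i j = true then
        if pvHAt heights i j > st.1 then (pvHAt heights i j, some [i, j]) else st
      else st) st) (-1, none)

def find_highest_water_tower (heights : List (List Int)) (town1 : List Int) (town2 : List Int) : Option (List Int) :=
  match heights, town1, town2 with
  | row0 :: _, [r1, c1], [r2, c2] =>
    let m : Int := (heights.length : Int)
    let n : Int := (row0.length : Int)
    let v1 := pvBfs heights m n (r1, c1)
      (List.replicate m.toNat (List.replicate n.toNat false))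
    let v2 := pvBfs heights m n (r2, c2)
      (List.replicate m.toNat (List.replicate n.toNat false))
    (pvScanA heights m n v1 v2).2
  | _, _, _ => none  -- Python raises here (empty grid / wrong-arity towns); outside Pre_

-- ===== PORT B =====
-- B-side helpers.  Source B's recursive dfs: mark the cell on entry, then try the four neighbours
-- (the 4-literal-tuple `for` loop is unrolled into four sequential guarded recursive calls, each
-- with exactly the Python guard).  Each recursive call targets a cell that was unmarked at call
-- time and marks it on entry, so the recursion depth never exceeds m*n: fuel m*n + 1 is exact
-- under Pre_ (proved via the invariant #unmarked < fuel in the lemmas below).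
def pvDfs (heights : List (List Int)) (m n : Int) :
    Nat → Int → Int → List (List Bool) → List (List Bool)
  | 0, _, _, v => v
  | fuel + 1, r, c, v =>
    let v0 := pvVSet v r c
    let v1 := if 0 ≤ r - 1 ∧ r - 1 < m ∧ 0 ≤ c ∧ c < n ∧ pvVAt v0 (r - 1) c = false ∧
        pvHAt heights (r - 1) c ≥ pvHAt heights r c then
      pvDfs heights m n fuel (r - 1) c v0 else v0
    let v2 := if 0 ≤ r + 1 ∧ r + 1 < m ∧ 0 ≤ c ∧ c < n ∧ pvVAt v1 (r + 1) c = false ∧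
        pvHAt heights (r + 1) c ≥ pvHAt heights r c then
      pvDfs heights m n fuel (r + 1) c v1 else v1
    let v3 := if 0 ≤ r ∧ r < m ∧ 0 ≤ c - 1 ∧ c - 1 < n ∧ pvVAt v2 r (c - 1) = false ∧
        pvHAt heights r (c - 1) ≥ pvHAt heights r c then
      pvDfs heights m n fuel r (c - 1) v2 else v2
    let v4 := if 0 ≤ r ∧ r < m ∧ 0 ≤ c + 1 ∧ c + 1 < n ∧ pvVAt v3 r (c + 1) = false ∧
        pvHAt heights r (c + 1) ≥ pvHAt heights r c then
      pvDfs heights m n fuel r (c + 1) v3 else v3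
    v4

def pvReachGridB (heights : List (List Int)) (m n r0 c0 : Int) : List (List Bool) :=
  pvDfs heights m n (m.toNat * n.toNat + 1) r0 c0
    (List.replicate m.toNat (List.replicate n.toNat false))

-- B's final double scan (single fused condition)
def pvScanB (heights : List (List Int)) (m n : Int) (w1 w2 : List (List Bool)) :
    Int × Option (List Int) :=
  (PySem.List.pyRange 0 m 1).foldl (fun st i =>
    (PySem.List.pyRange 0 n 1).foldl (fun st j =>
      if pvVAt w1 i j = true ∧ pvVAt w2 i j = true ∧ pvHAt heights i j > st.1 then
        (pvHAt heights i j, some [i, j])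
      else st) st) (-1, none)

def find_highest_water_tower_alt (heights : List (List Int)) (town1 : List Int) (town2 : List Int) : Option (List Int) :=
  if heights = [] ∨ town1.length ≠ 2 ∨ town2.length ≠ 2 then
    none  -- Python raises here (heights[0] on an empty grid / unpacking a town of length ≠ 2); outside Pre_
  else
    let m : Int := (heights.length : Int)
    let n : Int := ((heights.headD []).length : Int)
    (pvScanB heights m n
      (pvReachGridB heights m n (town1.getD 0 0) (town1.getD 1 0))
      (pvReachGridB heights m n (town2.getD 0 0) (town2.getD 1 0))).2

-- ===== PRECONDITION & SPEC =====
-- Pre_ is the domain on which the Python A returns by design: a nonempty rectangular grid and two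
-- two-element towns whose coordinates are valid Python indices into it (negative values index from
-- the end, as both Pythons' list indexing does).  Outside it A raises (empty grid, wrong-arity
-- towns, indices beyond the wrap range) — except that on a ragged grid A happens to return when
-- its search never reads past a short row; B reads exactly the same cells and returns the same
-- value there, and rectangularity is excluded only because raggedness makes both programs raise
-- on most inputs (see the cites in the claim).
def Pre_find_highest_water_tower (heights : List (List Int)) (town1 : List Int) (town2 : List Int) : Prop :=
  heights ≠ [] ∧
  (∀ row ∈ heights, row.length = (heights.headD []).length) ∧
  town1.length = 2 ∧ town2.length = 2 ∧
  -(heights.length : Int) ≤ town1.getD 0 0 ∧ town1.getD 0 0 < (heights.length : Int) ∧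
  -((heights.headD []).length : Int) ≤ town1.getD 1 0 ∧
    town1.getD 1 0 < ((heights.headD []).length : Int) ∧
  -(heights.length : Int) ≤ town2.getD 0 0 ∧ town2.getD 0 0 < (heights.length : Int) ∧
  -((heights.headD []).length : Int) ≤ town2.getD 1 0 ∧
    town2.getD 1 0 < ((heights.headD []).length : Int)

instance (heights : List (List Int)) (town1 : List Int) (town2 : List Int) : Decidable (Pre_find_highest_water_tower heights town1 town2) := by
  unfold Pre_find_highest_water_tower; infer_instance

def pvWitness_find_highest_water_tower : List (List Int) × List Int × List Int :=
  ([[1, 2], [3, 4]], [0, 0], [1, 1])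

def Spec_find_highest_water_tower (heights : List (List Int)) (town1 : List Int) (town2 : List Int) (out : Option (List Int)) : Prop := out = find_highest_water_tower_alt heights town1 town2
instance (heights : List (List Int)) (town1 : List Int) (town2 : List Int) (out : Option (List Int)) : Decidable (Spec_find_highest_water_tower heights town1 town2 out) := by unfold Spec_find_highest_water_tower; infer_instance

-- ===== CLAIM (what is proved, stated in full; the proofs are below) =====
def Claim_equal_find_highest_water_tower : Prop := ∀ (heights : List (List Int)) (town1 : List Int) (town2 : List Int), Dom_find_highest_water_tower heights town1 town2 → Pre_find_highest_water_tower heights town1 town2 → Spec_find_highest_water_tower heights town1 town2 (find_highest_water_tower heights town1 town2)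

-- ===== LEMMAS AND PROOFS =====

-- in-range cells, moves, and reachability (the common abstraction both flood fills compute)
def pvInR (m n : Int) (p : Int × Int) : Prop :=
  0 ≤ p.1 ∧ p.1 < m ∧ 0 ≤ p.2 ∧ p.2 < n

def pvNbrs (r c : Int) : List (Int × Int) := [(r - 1, c), (r + 1, c), (r, c - 1), (r, c + 1)]

def pvAdj (heights : List (List Int)) (m n : Int) (p q : Int × Int) : Prop :=
  q ∈ pvNbrs p.1 p.2 ∧ pvInR m n q ∧ pvHAt heights q.1 q.2 ≥ pvHAt heights p.1 p.2

-- reachability from the raw start s whose marked alias is the wrapped in-range cell W: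
-- W is marked at once but never expanded (unless it is s itself), which both flood fills share
inductive pvReachW (heights : List (List Int)) (m n : Int) (s W : Int × Int) :
    Int × Int → Prop
  | refl : pvReachW heights m n s W s
  | step {p q : Int × Int} : pvReachW heights m n s W p → (p = s ∨ p ≠ W) →
      pvAdj heights m n p q → pvReachW heights m n s W q

-- grid shape and basic grid lemmas
def pvShape (m n : Int) (v : List (List Bool)) : Prop :=
  v.length = m.toNat ∧ ∀ row ∈ v, row.length = n.toNat

theorem pvShape_replicate (m n : Int) :
    pvShape m n (List.replicate m.toNat (List.replicate n.toNat false)) := by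
  constructor
  · simp
  · intro row hrow
    simp_all [List.eq_of_mem_replicate hrow]

theorem pvGetD_default_or_mem {α : Type} (xs : List α) (i : Int) (d : α) :
    PySem.List.pyGetD xs i d = d ∨ PySem.List.pyGetD xs i d ∈ xs := by
  unfold PySem.List.pyGetD PySem.List.pyGet?
  rcases PySem.List.pyIdx? xs.length i with _ | k
  · left; rfl
  · rcases h : xs[k]? with _ | a
    · left; simp [h]
    · right; simp [h]; exact List.mem_of_getElem? h

theorem pvVAt_replicate (m n : Int) (r c : Int) :
    pvVAt (List.replicate m.toNat (List.replicate n.toNat false)) r c = false := by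
  unfold pvVAt
  rcases pvGetD_default_or_mem (List.replicate m.toNat (List.replicate n.toNat false)) r []
    with h | h
  · rw [h]
    rcases pvGetD_default_or_mem ([] : List Bool) c false with h2 | h2
    · exact h2
    · simp at h2
  · rw [List.eq_of_mem_replicate h]
    rcases pvGetD_default_or_mem (List.replicate n.toNat false) c false with h2 | h2
    · exact h2
    · exact List.eq_of_mem_replicate h2

theorem pvGetD_set {α : Type} (l : List α) {i : Nat} (j : Nat) (a d : α)
    (hi : i < l.length) :
    (l.set i a).getD j d = if i = j then a else l.getD j d := by
  by_cases hij : i = j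
  · subst hij
    simp [List.getD_eq_getElem?_getD, hi]
  · simp [List.getD_eq_getElem?_getD, hij]

theorem pvVAt_nonneg (v : List (List Bool)) {r c : Int} (hr : 0 ≤ r) (hc : 0 ≤ c) :
    pvVAt v r c = (v.getD r.toNat []).getD c.toNat false := by
  unfold pvVAt
  rw [PySem.List.pyGetD_of_nonneg _ _ hr, PySem.List.pyGetD_of_nonneg _ _ hc]

theorem pvVSet_nonneg (v : List (List Bool)) {r c : Int} (hr : 0 ≤ r) (hc : 0 ≤ c) :
    pvVSet v r c = v.set r.toNat ((v.getD r.toNat []).set c.toNat true) := by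
  unfold pvVSet
  rw [PySem.List.pyGetD_of_nonneg _ _ hr, PySem.List.pySetD_of_nonneg _ _ hc,
    PySem.List.pySetD_of_nonneg _ _ hr]

theorem pvRow_len (m n : Int) (v : List (List Bool)) (hs : pvShape m n v)
    {r : Int} (hr0 : 0 ≤ r) (hrm : r < m) :
    (v.getD r.toNat []).length = n.toNat := by
  obtain ⟨h1, h2⟩ := hs
  have hi : r.toNat < v.length := by omega
  rw [List.getD_eq_getElem _ _ hi]
  exact h2 _ (List.getElem_mem hi)

theorem pvShape_vSet (m n : Int) (v : List (List Bool)) (hs : pvShape m n v)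
    {r c : Int} (h : pvInR m n (r, c)) : pvShape m n (pvVSet v r c) := by
  have hr0 : 0 ≤ r := h.1
  have hrm : r < m := h.2.1
  have hc0 : 0 ≤ c := h.2.2.1
  have hcn : c < n := h.2.2.2
  rw [pvVSet_nonneg v hr0 hc0]
  obtain ⟨h1, h2⟩ := hs
  refine ⟨by simpa using h1, ?_⟩
  intro row hrow
  rcases List.mem_or_eq_of_mem_set hrow with hmem | heq
  · exact h2 _ hmem
  · subst heq
    simp only [List.length_set]
    exact pvRow_len m n v ⟨h1, h2⟩ hr0 hrm

theorem pvVAt_vSet (m n : Int) (v : List (List Bool)) (hs : pvShape m n v)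
    {r c r' c' : Int} (h : pvInR m n (r, c)) (h' : pvInR m n (r', c')) :
    pvVAt (pvVSet v r c) r' c' = if r' = r ∧ c' = c then true else pvVAt v r' c' := by
  have hr0 : 0 ≤ r := h.1
  have hrm : r < m := h.2.1
  have hc0 : 0 ≤ c := h.2.2.1
  have hcn : c < n := h.2.2.2
  have hr0' : 0 ≤ r' := h'.1
  have hrm' : r' < m := h'.2.1
  have hc0' : 0 ≤ c' := h'.2.2.1
  have hcn' : c' < n := h'.2.2.2
  have hlen : r.toNat < v.length := by obtain ⟨h1, _⟩ := hs; omega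
  have hrowlen := pvRow_len m n v hs hr0 hrm
  rw [pvVAt_nonneg _ hr0' hc0', pvVSet_nonneg v hr0 hc0,
    pvGetD_set v r'.toNat _ [] hlen]
  by_cases hrr : r.toNat = r'.toNat
  · have hre : r' = r := by omega
    simp only [if_pos hrr]
    rw [pvGetD_set _ c'.toNat _ false (by omega)]
    by_cases hcc : c.toNat = c'.toNat
    · have : c' = c := by omega
      simp [hcc, hre, this]
    · have : ¬(r' = r ∧ c' = c) := by intro ⟨_, hh⟩; omega
      simp only [if_neg hcc, if_neg this]
      rw [pvVAt_nonneg _ hr0' hc0', hre]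
  · have hre : ¬(r' = r ∧ c' = c) := by intro ⟨hh, _⟩; omega
    simp only [if_neg hrr, if_neg hre]
    rw [pvVAt_nonneg _ hr0' hc0']

-- count of unmarked cells in a grid
def pvCnt (v : List (List Bool)) : Nat :=
  (v.map (fun row => row.countP (fun b => !b))).sum

theorem pvCnt_replicate (m n : Int) :
    pvCnt (List.replicate m.toNat (List.replicate n.toNat false)) = m.toNat * n.toNat := by
  unfold pvCnt
  simp [List.countP_replicate]

theorem pvCountP_set_true (l : List Bool) {i : Nat} (hi : i < l.length)
    (hf : l.getD i true = false) :
    (l.set i true).countP (fun b => !b) + 1 = l.countP (fun b => !b) := by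
  induction l generalizing i with
  | nil => simp at hi
  | cons a t ih =>
    cases i with
    | zero =>
      have ha : a = false := by simpa using hf
      subst ha
      simp
    | succ k =>
      have hk : k < t.length := by simpa using hi
      have hf' : t.getD k true = false := by simpa using hf
      have := ih hk hf'
      simp only [List.set_cons_succ, List.countP_cons]
      omega

theorem pvSum_eq_take_drop (l : List Nat) {i : Nat} (hi : i < l.length) :
    l.sum = (l.take i).sum + l.getD i 0 + (l.drop (i + 1)).sum := by
  rw [List.getD_eq_getElem l 0 hi]
  have hsplit : l = (l.take i) ++ l[i] :: l.drop (i + 1) := by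
    rw [← List.drop_eq_getElem_cons hi, List.take_append_drop]
  conv_lhs => rw [hsplit]
  rw [List.sum_append, List.sum_cons]
  omega

theorem pvCnt_vSet (m n : Int) (v : List (List Bool)) (hs : pvShape m n v)
    {r c : Int} (h : pvInR m n (r, c)) (hf : pvVAt v r c = false) :
    pvCnt (pvVSet v r c) + 1 = pvCnt v := by
  have hr0 : 0 ≤ r := h.1
  have hrm : r < m := h.2.1
  have hc0 : 0 ≤ c := h.2.2.1
  have hcn : c < n := h.2.2.2
  have h1 := hs.1
  have hlen : r.toNat < v.length := by omega
  have hrowlen := pvRow_len m n v hs hr0 hrm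
  have hclen : c.toNat < (v.getD r.toNat []).length := by omega
  have hcell : (v.getD r.toNat []).getD c.toNat true = false := by
    rw [pvVAt_nonneg v hr0 hc0] at hf
    rw [List.getD_eq_getElem _ _ hclen] at hf ⊢
    exact hf
  rw [pvVSet_nonneg v hr0 hc0]
  unfold pvCnt
  rw [List.map_set, List.sum_set]
  have hmlen : r.toNat < (v.map (fun row => row.countP (fun b => !b))).length := by
    simpa using hlen
  rw [pvSum_eq_take_drop (v.map (fun row => row.countP (fun b => !b))) hmlen]
  have hgd : (v.map (fun row => row.countP (fun b => !b))).getD r.toNat 0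
      = (v.getD r.toNat []).countP (fun b => !b) := by
    rw [List.getD_eq_getElem _ _ hmlen, List.getElem_map, List.getD_eq_getElem _ _ hlen]
  rw [hgd, if_pos hmlen]
  have := pvCountP_set_true (v.getD r.toNat []) hclen hcell
  omega

-- Python negative-index wraparound, normalised
def pvWrap (len i : Int) : Int := if i < 0 then len + i else i

theorem pvIdx_wrap (len : Nat) (i : Int) (h0 : -(len : Int) ≤ i) (h1 : i < (len : Int)) :
    PySem.List.pyIdx? len i = some (pvWrap len i).toNat := by
  unfold PySem.List.pyIdx? pvWrap
  by_cases hi : 0 ≤ i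
  · rw [if_pos hi, if_pos h1, if_neg (by omega : ¬i < 0)]
  · rw [if_neg hi, if_pos h0, if_pos (by omega : i < 0)]
    congr 1
    omega

theorem pvGetD_wrap {α : Type} (xs : List α) (i : Int) (d : α)
    (h0 : -(xs.length : Int) ≤ i) (h1 : i < (xs.length : Int)) :
    PySem.List.pyGetD xs i d = xs.getD (pvWrap xs.length i).toNat d := by
  unfold PySem.List.pyGetD PySem.List.pyGet?
  rw [pvIdx_wrap xs.length i h0 h1]
  simp [List.getD_eq_getElem?_getD]

theorem pvSetD_wrap {α : Type} (xs : List α) (i : Int) (v : α)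
    (h0 : -(xs.length : Int) ≤ i) (h1 : i < (xs.length : Int)) :
    PySem.List.pySetD xs i v = xs.set (pvWrap xs.length i).toNat v := by
  unfold PySem.List.pySetD PySem.List.pySet?
  rw [pvIdx_wrap xs.length i h0 h1]
  rfl

theorem pvWrap_inR (m n : Int) {r c : Int} (hr0 : -m ≤ r) (hr1 : r < m)
    (hc0 : -n ≤ c) (hc1 : c < n) (hm : 0 < m) (hn : 0 < n) :
    pvInR m n (pvWrap m r, pvWrap n c) := by
  unfold pvWrap pvInR
  refine ⟨?_, ?_, ?_, ?_⟩ <;> split <;> omega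

theorem pvWrap_id (len : Int) {i : Int} (h : 0 ≤ i) : pvWrap len i = i := by
  unfold pvWrap
  rw [if_neg (by omega)]

theorem pvVSet_wrap (m n : Int) (v : List (List Bool)) (hs : pvShape m n v)
    {r c : Int} (hr0 : -m ≤ r) (hr1 : r < m) (hc0 : -n ≤ c) (hc1 : c < n)
    (hm : 0 < m) (hn : 0 < n) :
    pvVSet v r c = pvVSet v (pvWrap m r) (pvWrap n c) := by
  have hlen : (v.length : Int) = m := by
    have := hs.1; omega
  have hwr : pvWrap m r = pvWrap v.length r := by rw [hlen]
  have hwin := pvWrap_inR m n hr0 hr1 hc0 hc1 hm hn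
  have hrow : PySem.List.pyGetD v r [] = v.getD (pvWrap m r).toNat [] := by
    rw [pvGetD_wrap v r [] (by omega) (by omega), hwr]
  have hrowlen : (v.getD (pvWrap m r).toNat []).length = n.toNat := by
    exact pvRow_len m n v hs hwin.1 hwin.2.1
  have hrown : ((v.getD (pvWrap m r).toNat []).length : Int) = n := by omega
  have hw1 : 0 ≤ pvWrap m r := hwin.1
  have hw2 : 0 ≤ pvWrap n c := hwin.2.2.1
  unfold pvVSet
  rw [hrow]
  rw [pvSetD_wrap (v.getD (pvWrap m r).toNat []) c true (by omega) (by omega)]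
  rw [pvSetD_wrap v r _ (by omega) (by omega)]
  rw [PySem.List.pyGetD_of_nonneg v _ hw1, PySem.List.pySetD_of_nonneg _ _ hw2,
    PySem.List.pySetD_of_nonneg v _ hw1]
  rw [← hwr]
  rw [show pvWrap ((v.getD (pvWrap m r).toNat []).length : Int) c = pvWrap n c from by
    rw [hrown]]

theorem pvVAt_wrap (m n : Int) (v : List (List Bool)) (hs : pvShape m n v)
    {r c : Int} (hr0 : -m ≤ r) (hr1 : r < m) (hc0 : -n ≤ c) (hc1 : c < n)
    (hm : 0 < m) (hn : 0 < n) :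
    pvVAt v r c = pvVAt v (pvWrap m r) (pvWrap n c) := by
  have hlen : (v.length : Int) = m := by
    have := hs.1; omega
  have hwr : pvWrap m r = pvWrap v.length r := by rw [hlen]
  have hwin := pvWrap_inR m n hr0 hr1 hc0 hc1 hm hn
  have hrow : PySem.List.pyGetD v r [] = v.getD (pvWrap m r).toNat [] := by
    rw [pvGetD_wrap v r [] (by omega) (by omega), hwr]
  have hrowlen : (v.getD (pvWrap m r).toNat []).length = n.toNat := by
    exact pvRow_len m n v hs hwin.1 hwin.2.1
  have hrown : ((v.getD (pvWrap m r).toNat []).length : Int) = n := by omega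
  have hw1 : 0 ≤ pvWrap m r := hwin.1
  have hw2 : 0 ≤ pvWrap n c := hwin.2.2.1
  unfold pvVAt
  rw [hrow]
  rw [pvGetD_wrap (v.getD (pvWrap m r).toNat []) c false (by omega) (by omega)]
  rw [PySem.List.pyGetD_of_nonneg v _ hw1, PySem.List.pyGetD_of_nonneg _ _ hw2]
  rw [show pvWrap ((v.getD (pvWrap m r).toNat []).length : Int) c = pvWrap n c from by
    rw [hrown]]

-- direction / neighbour bookkeeping
theorem pvNbrs_of_dir {r c : Int} {d : Int × Int} (hd : d ∈ pvDirs) :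
    (r + d.1, c + d.2) ∈ pvNbrs r c := by
  simp only [pvDirs, List.mem_cons, List.not_mem_nil, or_false] at hd
  rcases hd with h | h | h | h <;> subst h <;>
    simp [pvNbrs, sub_eq_add_neg]

theorem pvDir_of_nbrs {r c : Int} {q : Int × Int} (hq : q ∈ pvNbrs r c) :
    ∃ d ∈ pvDirs, q = (r + d.1, c + d.2) := by
  simp only [pvNbrs, List.mem_cons, List.not_mem_nil, or_false] at hq
  rcases hq with h | h | h | h <;> subst h
  · exact ⟨(-1, 0), by simp [pvDirs], by simp [sub_eq_add_neg]⟩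
  · exact ⟨(1, 0), by simp [pvDirs], by simp⟩
  · exact ⟨(0, -1), by simp [pvDirs], by simp [sub_eq_add_neg]⟩
  · exact ⟨(0, 1), by simp [pvDirs], by simp⟩

-- ---- BFS side: one relax step ----
theorem pvRelax_spec (heights : List (List Int)) (m n r c : Int)
    (st : List (List Bool) × List (Int × Int)) (hs : pvShape m n st.1)
    {d : Int × Int} (hd : d ∈ pvDirs) :
    pvShape m n (pvRelax heights m n r c st d).1 ∧
    (pvRelax heights m n r c st d).2.length + pvCnt (pvRelax heights m n r c st d).1
      = st.2.length + pvCnt st.1 ∧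
    (∀ p ∈ st.2, p ∈ (pvRelax heights m n r c st d).2) ∧
    (∀ p : Int × Int, pvInR m n p → pvVAt st.1 p.1 p.2 = true →
      pvVAt (pvRelax heights m n r c st d).1 p.1 p.2 = true) ∧
    (∀ p : Int × Int, pvInR m n p → pvVAt (pvRelax heights m n r c st d).1 p.1 p.2 = true →
      pvVAt st.1 p.1 p.2 = true ∨
        (pvAdj heights m n (r, c) p ∧ p ∈ (pvRelax heights m n r c st d).2)) ∧
    (∀ p ∈ (pvRelax heights m n r c st d).2, p ∈ st.2 ∨
      (pvAdj heights m n (r, c) p ∧ pvVAt (pvRelax heights m n r c st d).1 p.1 p.2 = true ∧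
        pvVAt st.1 p.1 p.2 = false)) ∧
    (pvAdj heights m n (r, c) (r + d.1, c + d.2) →
      pvVAt (pvRelax heights m n r c st d).1 (r + d.1) (c + d.2) = true) := by
  unfold pvRelax
  by_cases h1 : 0 ≤ r + d.1 ∧ r + d.1 < m ∧ 0 ≤ c + d.2 ∧ c + d.2 < n ∧
      pvVAt st.1 (r + d.1) (c + d.2) = false
  · by_cases h2 : pvHAt heights (r + d.1) (c + d.2) ≥ pvHAt heights r c
    · simp only [if_pos h1, if_pos h2]
      have hin : pvInR m n (r + d.1, c + d.2) := ⟨h1.1, h1.2.1, h1.2.2.1, h1.2.2.2.1⟩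
      have hadj : pvAdj heights m n (r, c) (r + d.1, c + d.2) :=
        ⟨pvNbrs_of_dir hd, hin, h2⟩
      have hset := fun (p : Int × Int) (hp : pvInR m n p) =>
        pvVAt_vSet m n st.1 hs hin hp
      refine ⟨pvShape_vSet m n st.1 hs hin, ?_, ?_, ?_, ?_, ?_, ?_⟩
      · have := pvCnt_vSet m n st.1 hs hin h1.2.2.2.2
        simp only [List.length_append, List.length_singleton]
        omega
      · intro p hp; simp [hp]
      · intro p hp hm
        rw [hset p hp]
        split <;> simp_all
      · intro p hp hm
        rw [hset p hp] at hm
        by_cases he : p.1 = r + d.1 ∧ p.2 = c + d.2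
        · right
          have hpe : p = (r + d.1, c + d.2) := Prod.ext he.1 he.2
          exact ⟨hpe ▸ hadj, by simp [hpe]⟩
        · left; rwa [if_neg he] at hm
      · intro p hp
        rcases List.mem_append.mp hp with h | h
        · exact Or.inl h
        · right
          have hpe : p = (r + d.1, c + d.2) := by simpa using h
          subst hpe
          refine ⟨hadj, ?_, h1.2.2.2.2⟩
          rw [hset _ hin]
          simp
      · intro _
        rw [hset _ hin]
        simp
    · simp only [if_pos h1, if_neg h2]
      refine ⟨hs, trivial, fun p hp => hp, fun p _ hm => hm,
        fun p _ hm => Or.inl hm, fun p hp => Or.inl hp, fun hadj => absurd hadj.2.2 h2⟩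
  · simp only [if_neg h1]
    refine ⟨hs, trivial, fun p hp => hp, fun p _ hm => hm,
      fun p _ hm => Or.inl hm, fun p hp => Or.inl hp, ?_⟩
    intro hadj
    rcases hadj with ⟨_, hin, hh⟩
    obtain ⟨ha, hb, hc, hdn⟩ : 0 ≤ r + d.1 ∧ r + d.1 < m ∧ 0 ≤ c + d.2 ∧ c + d.2 < n :=
      ⟨hin.1, hin.2.1, hin.2.2.1, hin.2.2.2⟩
    rcases Bool.eq_false_or_eq_true (pvVAt st.1 (r + d.1) (c + d.2)) with hv | hv
    · exact hv
    · exact absurd ⟨ha, hb, hc, hdn, hv⟩ h1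

-- the whole `for dr, dc in directions` fold
theorem pvRelaxFold_spec (heights : List (List Int)) (m n r c : Int) :
    ∀ (l : List (Int × Int)), (∀ d ∈ l, d ∈ pvDirs) →
    ∀ st : List (List Bool) × List (Int × Int), pvShape m n st.1 →
    pvShape m n (l.foldl (pvRelax heights m n r c) st).1 ∧
    (l.foldl (pvRelax heights m n r c) st).2.length
        + pvCnt (l.foldl (pvRelax heights m n r c) st).1 = st.2.length + pvCnt st.1 ∧
    (∀ p ∈ st.2, p ∈ (l.foldl (pvRelax heights m n r c) st).2) ∧
    (∀ p : Int × Int, pvInR m n p → pvVAt st.1 p.1 p.2 = true →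
      pvVAt (l.foldl (pvRelax heights m n r c) st).1 p.1 p.2 = true) ∧
    (∀ p : Int × Int, pvInR m n p →
      pvVAt (l.foldl (pvRelax heights m n r c) st).1 p.1 p.2 = true →
      pvVAt st.1 p.1 p.2 = true ∨
        (pvAdj heights m n (r, c) p ∧ p ∈ (l.foldl (pvRelax heights m n r c) st).2)) ∧
    (∀ p ∈ (l.foldl (pvRelax heights m n r c) st).2, p ∈ st.2 ∨
      (pvAdj heights m n (r, c) p ∧
        pvVAt (l.foldl (pvRelax heights m n r c) st).1 p.1 p.2 = true ∧
        pvVAt st.1 p.1 p.2 = false)) ∧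
    (∀ d ∈ l, pvAdj heights m n (r, c) (r + d.1, c + d.2) →
      pvVAt (l.foldl (pvRelax heights m n r c) st).1 (r + d.1) (c + d.2) = true) := by
  intro l
  induction l with
  | nil =>
    intro _ st hs
    exact ⟨hs, rfl, fun p hp => hp, fun p _ hm => hm, fun p _ hm => Or.inl hm,
      fun p hp => Or.inl hp, by simp⟩
  | cons d t ih =>
    intro hl st hs
    have hd : d ∈ pvDirs := hl d (by simp)
    obtain ⟨s1, s2, s3, s4, s5, s6, s7⟩ := pvRelax_spec heights m n r c st hs hd
    obtain ⟨t1, t2, t3, t4, t5, t6, t7⟩ :=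
      ih (fun d' hd' => hl d' (by simp [hd'])) (pvRelax heights m n r c st d) s1
    simp only [List.foldl_cons]
    refine ⟨t1, by omega, fun p hp => t3 _ (s3 _ hp), fun p hp hm => t4 p hp (s4 p hp hm),
      ?_, ?_, ?_⟩
    · intro p hp hm
      rcases t5 p hp hm with h | ⟨ha, hq⟩
      · rcases s5 p hp h with h' | ⟨ha, hq⟩
        · exact Or.inl h'
        · exact Or.inr ⟨ha, t3 _ hq⟩
      · exact Or.inr ⟨ha, hq⟩
    · intro p hp
      rcases t6 p hp with h | ⟨ha, hm, hf⟩
      · rcases s6 p h with h' | ⟨ha, hm, hf⟩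
        · exact Or.inl h'
        · exact Or.inr ⟨ha, t4 p ha.2.1 hm, hf⟩
      · refine Or.inr ⟨ha, hm, ?_⟩
        cases hb : pvVAt st.1 p.1 p.2 with
        | false => rfl
        | true => exact absurd (s4 p ha.2.1 hb) (by simp [hf])
    · intro d' hd' hadj
      rcases List.mem_cons.mp hd' with he | ht
      · subst he
        exact t4 _ hadj.2.1 (s7 hadj)
      · exact t7 d' ht hadj

-- the `while queue` loop of A computes exactly {W} ∪ the reachable cells
theorem pvBfsLoop_spec (heights : List (List Int)) (m n : Int) (s W : Int × Int)
    (hWIn : pvInR m n W) (hsW : pvInR m n s → s = W) :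
    ∀ (fuel : Nat) (Q : List (Int × Int)) (v : List (List Bool)), pvShape m n v →
    pvVAt v W.1 W.2 = true →
    (∀ p ∈ Q, pvReachW heights m n s W p ∧
      (p = s ∨ (pvInR m n p ∧ pvVAt v p.1 p.2 = true ∧ p ≠ W))) →
    (∀ p : Int × Int, pvInR m n p → pvVAt v p.1 p.2 = true →
      p = W ∨ pvReachW heights m n s W p) →
    (∀ p : Int × Int, pvInR m n p → pvVAt v p.1 p.2 = true → p ∉ Q →
      p = W ∨ ∀ q, pvAdj heights m n p q → pvVAt v q.1 q.2 = true) →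
    (s ∉ Q → ∀ q, pvAdj heights m n s q → pvVAt v q.1 q.2 = true) →
    Q.length + pvCnt v ≤ fuel →
    ∀ p : Int × Int, pvInR m n p →
      (pvVAt (pvBfsLoop heights m n fuel Q v) p.1 p.2 = true ↔
        (p = W ∨ pvReachW heights m n s W p)) := by
  intro fuel
  induction fuel with
  | zero =>
    intro Q v hs hW hQ hsound hdef hscl hfuel p hp
    match Q, hQ, hdef, hscl, hfuel with
    | [], hQ, hdef, hscl, hfuel =>
      simp only [pvBfsLoop]
      constructor
      · exact hsound p hp
      · intro hr
        have key : ∀ x, pvReachW heights m n s W x →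
            x = s ∨ (pvInR m n x ∧ pvVAt v x.1 x.2 = true) := by
          intro x hx
          induction hx with
          | refl => exact Or.inl rfl
          | step hr' hcond hadj ih =>
            right
            refine ⟨hadj.2.1, ?_⟩
            rcases ih with he | ⟨hin', hm'⟩
            · exact hscl (by simp) _ (he ▸ hadj)
            · rcases hcond with he | hne
              · exact hscl (by simp) _ (he ▸ hadj)
              · rcases hdef _ hin' hm' (by simp) with hw | hcl
                · exact absurd hw hne
                · exact hcl _ hadj
        rcases hr with he | hr
        · exact he ▸ hW
        · rcases key p hr with he | ⟨_, hm⟩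
          · subst he
            rw [hsW hp]
            exact hW
          · exact hm
    | _ :: _, _, _, _, hfuel => simp at hfuel
  | succ fuel ih =>
    intro Q v hs hW hQ hsound hdef hscl hfuel p hp
    match Q, hQ, hdef, hscl, hfuel with
    | [], hQ, hdef, hscl, hfuel =>
      simp only [pvBfsLoop]
      constructor
      · exact hsound p hp
      · intro hr
        have key : ∀ x, pvReachW heights m n s W x →
            x = s ∨ (pvInR m n x ∧ pvVAt v x.1 x.2 = true) := by
          intro x hx
          induction hx with
          | refl => exact Or.inl rfl
          | step hr' hcond hadj ih =>
            right
            refine ⟨hadj.2.1, ?_⟩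
            rcases ih with he | ⟨hin', hm'⟩
            · exact hscl (by simp) _ (he ▸ hadj)
            · rcases hcond with he | hne
              · exact hscl (by simp) _ (he ▸ hadj)
              · rcases hdef _ hin' hm' (by simp) with hw | hcl
                · exact absurd hw hne
                · exact hcl _ hadj
        rcases hr with he | hr
        · exact he ▸ hW
        · rcases key p hr with he | ⟨_, hm⟩
          · subst he
            rw [hsW hp]
            exact hW
          · exact hm
    | (r, c) :: rest, hQ, hdef, hscl, hfuel =>
      have hrc := hQ (r, c) (by simp)
      obtain ⟨t1, t2, t3, t4, t5, t6, t7⟩ :=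
        pvRelaxFold_spec heights m n r c pvDirs (fun d hd => hd) (v, rest) hs
      have hcond : (r, c) = s ∨ (r, c) ≠ W := by
        rcases hrc.2 with h | h
        · exact Or.inl h
        · exact Or.inr h.2.2
      have hunfold : pvBfsLoop heights m n (fuel + 1) ((r, c) :: rest) v
          = pvBfsLoop heights m n fuel
              (pvDirs.foldl (pvRelax heights m n r c) (v, rest)).2
              (pvDirs.foldl (pvRelax heights m n r c) (v, rest)).1 := by
        simp only [pvBfsLoop, pvBfsStep]
      rw [hunfold]
      refine ih _ _ t1 (t4 W hWIn hW) ?_ ?_ ?_ ?_ ?_ p hp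
      · intro q hq
        rcases t6 q hq with h | ⟨ha, hm, hf⟩
        · have := hQ q (by simp [h])
          refine ⟨this.1, ?_⟩
          rcases this.2 with h' | h'
          · exact Or.inl h'
          · exact Or.inr ⟨h'.1, t4 q h'.1 h'.2.1, h'.2.2⟩
        · refine ⟨pvReachW.step hrc.1 hcond ha, Or.inr ⟨ha.2.1, hm, ?_⟩⟩
          intro he
          rw [he] at hf
          rw [hW] at hf
          cases hf
      · intro q hqIn hm
        rcases t5 q hqIn hm with h | ⟨ha, _⟩
        · exact hsound q hqIn h
        · exact Or.inr (pvReachW.step hrc.1 hcond ha)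
      · intro q hqIn hm hnot
        rcases t5 q hqIn hm with hv | ⟨ha, hmem⟩
        · by_cases hpe : q = (r, c)
          · subst hpe
            right
            intro w hw
            obtain ⟨d, hd, he⟩ := pvDir_of_nbrs hw.1
            rw [he]
            exact t7 d hd (he ▸ hw)
          · have hnotQ : q ∉ (r, c) :: rest := by
              intro hmem
              rcases List.mem_cons.mp hmem with h | h
              · exact hpe h
              · exact hnot (t3 q h)
            rcases hdef q hqIn hv hnotQ with hw | hcl
            · exact Or.inl hw
            · exact Or.inr (fun w hw => t4 w hw.2.1 (hcl w hw))
        · exact absurd hmem hnot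
      · intro hsnot q hq
        by_cases hse : s = (r, c)
        · subst hse
          obtain ⟨d, hd, he⟩ := pvDir_of_nbrs hq.1
          rw [he]
          exact t7 d hd (he ▸ hq)
        · have hsnotQ : s ∉ (r, c) :: rest := by
            intro hmem
            rcases List.mem_cons.mp hmem with h | h
            · exact hse h
            · exact hsnot (t3 s h)
          exact t4 q hq.2.1 (hscl hsnotQ q hq)
      · have : ((r, c) :: rest).length + pvCnt v ≤ fuel + 1 := hfuel
        simp only [List.length_cons] at this
        have t2' : (pvDirs.foldl (pvRelax heights m n r c) (v, rest)).2.length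
            + pvCnt (pvDirs.foldl (pvRelax heights m n r c) (v, rest)).1
            = rest.length + pvCnt v := t2
        omega

theorem pvBfs_spec (heights : List (List Int)) (m n : Int) (s W : Int × Int)
    (hWIn : pvInR m n W) (hsW : pvInR m n s → s = W)
    (hwrapset : pvVSet (List.replicate m.toNat (List.replicate n.toNat false)) s.1 s.2
      = pvVSet (List.replicate m.toNat (List.replicate n.toNat false)) W.1 W.2) :
    ∀ p : Int × Int, pvInR m n p →
      (pvVAt (pvBfs heights m n s
          (List.replicate m.toNat (List.replicate n.toNat false))) p.1 p.2 = true
        ↔ (p = W ∨ pvReachW heights m n s W p)) := by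
  intro p hp
  have hs0 : pvShape m n (List.replicate m.toNat (List.replicate n.toNat false)) :=
    pvShape_replicate m n
  have hmark : ∀ q : Int × Int, pvInR m n q →
      (pvVAt (pvVSet (List.replicate m.toNat (List.replicate n.toNat false)) W.1 W.2)
          q.1 q.2 = true ↔ q = W) := by
    intro q hq
    rw [pvVAt_vSet m n _ hs0 hWIn hq, pvVAt_replicate]
    constructor
    · intro h
      by_cases he : q.1 = W.1 ∧ q.2 = W.2
      · exact Prod.ext he.1 he.2
      · simp [if_neg he] at h
    · intro h
      subst h
      simp
  unfold pvBfs
  rw [hwrapset]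
  refine pvBfsLoop_spec heights m n s W hWIn hsW _ _ _
    (pvShape_vSet m n _ hs0 hWIn) ((hmark W hWIn).mpr rfl) ?_ ?_ ?_ ?_ ?_ p hp
  · intro q hq
    have hqe : q = s := by simpa using hq
    subst hqe
    exact ⟨pvReachW.refl, Or.inl rfl⟩
  · intro q hqIn hm
    exact Or.inl ((hmark q hqIn).mp hm)
  · intro q hqIn hm _
    exact Or.inl ((hmark q hqIn).mp hm)
  · intro hs
    exact absurd (by simp) hs
  · have hvs : pvVAt (List.replicate m.toNat (List.replicate n.toNat false)) W.1 W.2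
        = false := pvVAt_replicate m n W.1 W.2
    have := pvCnt_vSet m n _ hs0 hWIn hvs
    have hrep := pvCnt_replicate m n
    simp only [List.length_singleton]
    omega

-- ---- DFS side ----

-- the state invariant threaded through the four unrolled neighbour steps of one dfs call:
-- shape, growth over the call's own post-mark grid v0, the wall W and (when in range) the
-- call's own cell marked, soundness, the fuel counter, and closure relative to the call's
-- incoming grid v (with the call's own cell exempt until its four steps are done)
def pvDfsOK (heights : List (List Int)) (m n : Int) (s W rc : Int × Int)
    (v w : List (List Bool)) : Prop :=
  pvShape m n w ∧
  (∀ p : Int × Int, pvInR m n p → pvVAt v p.1 p.2 = true → pvVAt w p.1 p.2 = true) ∧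
  pvVAt w W.1 W.2 = true ∧
  (pvInR m n rc → pvVAt w rc.1 rc.2 = true) ∧
  (∀ p : Int × Int, pvInR m n p → pvVAt w p.1 p.2 = true →
    p = W ∨ pvReachW heights m n s W p) ∧
  pvCnt w + 1 ≤ pvCnt v ∧
  (∀ p : Int × Int, pvInR m n p → pvVAt w p.1 p.2 = true →
    pvVAt v p.1 p.2 = true ∨ p = W ∨ p = rc ∨
      (∀ q, pvAdj heights m n p q → pvVAt w q.1 q.2 = true))

-- the recursive dfs computes exactly the cells reachable from its argument (W acting as a wall)
theorem pvDfs_spec (heights : List (List Int)) (m n : Int) (s W : Int × Int)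
    (hWIn : pvInR m n W) (hsW : pvInR m n s → s = W)
    (hVS : ∀ v : List (List Bool), pvShape m n v →
      pvVSet v s.1 s.2 = pvVSet v W.1 W.2)
    (hVA : ∀ v : List (List Bool), pvShape m n v →
      pvVAt v s.1 s.2 = pvVAt v W.1 W.2) :
    ∀ (fuel : Nat) (r c : Int) (v : List (List Bool)), pvShape m n v →
    ((r, c) = s ∨ ((r, c) ≠ W ∧ pvInR m n (r, c) ∧
      pvReachW heights m n s W (r, c) ∧ pvVAt v W.1 W.2 = true)) →
    pvVAt v r c = false →
    (∀ p : Int × Int, pvInR m n p → pvVAt v p.1 p.2 = true →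
      p = W ∨ pvReachW heights m n s W p) →
    pvCnt v < fuel →
    pvShape m n (pvDfs heights m n fuel r c v) ∧
    (∀ p : Int × Int, pvInR m n p → pvVAt v p.1 p.2 = true →
      pvVAt (pvDfs heights m n fuel r c v) p.1 p.2 = true) ∧
    pvVAt (pvDfs heights m n fuel r c v) W.1 W.2 = true ∧
    (pvInR m n (r, c) → pvVAt (pvDfs heights m n fuel r c v) r c = true) ∧
    (∀ p : Int × Int, pvInR m n p → pvVAt (pvDfs heights m n fuel r c v) p.1 p.2 = true →
      p = W ∨ pvReachW heights m n s W p) ∧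
    pvCnt (pvDfs heights m n fuel r c v) + 1 ≤ pvCnt v ∧
    (∀ q, pvAdj heights m n (r, c) q →
      pvVAt (pvDfs heights m n fuel r c v) q.1 q.2 = true) ∧
    (∀ p : Int × Int, pvInR m n p → pvVAt (pvDfs heights m n fuel r c v) p.1 p.2 = true →
      pvVAt v p.1 p.2 = true ∨ p = W ∨
        (∀ q, pvAdj heights m n p q →
          pvVAt (pvDfs heights m n fuel r c v) q.1 q.2 = true)) := by
  intro fuel
  induction fuel with
  | zero =>
    intro r c v _ _ _ _ hfuel
    omega
  | succ fuel ih =>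
    intro r c v hs Hrc hnew hinv hfuel
    -- v0 = the grid after `visited[r][c] = True` (the write wraps to W when (r, c) = s)
    have hOK0 : pvDfsOK heights m n s W (r, c) v (pvVSet v r c) := by
      rcases Hrc with he | ⟨hne, hin, hreach, hWv⟩
      · have hr : r = s.1 := by rw [← he]
        have hc : c = s.2 := by rw [← he]
        have heq : pvVSet v r c = pvVSet v W.1 W.2 := by
          rw [hr, hc]; exact hVS v hs
        have hVAe : pvVAt v r c = pvVAt v W.1 W.2 := by
          rw [hr, hc]; exact hVA v hs
        have hnewW : pvVAt v W.1 W.2 = false := hVAe ▸ hnew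
        refine ⟨by rw [heq]; exact pvShape_vSet m n v hs hWIn, ?_, ?_, ?_, ?_, ?_, ?_⟩
        · intro p hp hv
          rw [heq, pvVAt_vSet m n v hs hWIn hp]
          split <;> simp_all
        · rw [heq, pvVAt_vSet m n v hs hWIn hWIn]
          simp
        · intro hinrc
          have hsW' : s = W := hsW (by rw [he] at hinrc; exact hinrc)
          have hrw : r = W.1 := by rw [hr, hsW']
          have hcw : c = W.2 := by rw [hc, hsW']
          rw [heq, hrw, hcw, pvVAt_vSet m n v hs hWIn hWIn]
          simp
        · intro p hp hm
          rw [heq, pvVAt_vSet m n v hs hWIn hp] at hm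
          by_cases hew : p.1 = W.1 ∧ p.2 = W.2
          · exact Or.inl (Prod.ext hew.1 hew.2)
          · rw [if_neg hew] at hm
            exact hinv p hp hm
        · have := pvCnt_vSet m n v hs hWIn hnewW
          rw [heq]
          omega
        · intro p hp hm
          rw [heq, pvVAt_vSet m n v hs hWIn hp] at hm
          by_cases hew : p.1 = W.1 ∧ p.2 = W.2
          · exact Or.inr (Or.inl (Prod.ext hew.1 hew.2))
          · rw [if_neg hew] at hm
            exact Or.inl hm
      · refine ⟨pvShape_vSet m n v hs hin, ?_, ?_, ?_, ?_, ?_, ?_⟩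
        · intro p hp hv
          rw [pvVAt_vSet m n v hs hin hp]
          split <;> simp_all
        · rw [pvVAt_vSet m n v hs hin hWIn]
          split
          · rfl
          · exact hWv
        · intro _
          rw [pvVAt_vSet m n v hs hin hin]
          simp
        · intro p hp hm
          rw [pvVAt_vSet m n v hs hin hp] at hm
          by_cases hew : p.1 = r ∧ p.2 = c
          · exact Or.inr ((Prod.ext hew.1 hew.2 : p = (r, c)) ▸ hreach)
          · rw [if_neg hew] at hm
            exact hinv p hp hm
        · have := pvCnt_vSet m n v hs hin hnew
          omega
        · intro p hp hm
          rw [pvVAt_vSet m n v hs hin hp] at hm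
          by_cases hew : p.1 = r ∧ p.2 = c
          · exact Or.inr (Or.inr (Or.inl (Prod.ext hew.1 hew.2)))
          · rw [if_neg hew] at hm
            exact Or.inl hm
    -- one unrolled neighbour step preserves the invariant and settles its own target
    have hstep : ∀ (tr tc : Int) (w : List (List Bool)), (tr, tc) ∈ pvNbrs r c →
        pvDfsOK heights m n s W (r, c) v w →
        pvDfsOK heights m n s W (r, c) v
          (if 0 ≤ tr ∧ tr < m ∧ 0 ≤ tc ∧ tc < n ∧ pvVAt w tr tc = false ∧
              pvHAt heights tr tc ≥ pvHAt heights r c then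
            pvDfs heights m n fuel tr tc w else w) ∧
        (∀ p : Int × Int, pvInR m n p → pvVAt w p.1 p.2 = true →
          pvVAt (if 0 ≤ tr ∧ tr < m ∧ 0 ≤ tc ∧ tc < n ∧ pvVAt w tr tc = false ∧
              pvHAt heights tr tc ≥ pvHAt heights r c then
            pvDfs heights m n fuel tr tc w else w) p.1 p.2 = true) ∧
        (pvAdj heights m n (r, c) (tr, tc) →
          pvVAt (if 0 ≤ tr ∧ tr < m ∧ 0 ≤ tc ∧ tc < n ∧ pvVAt w tr tc = false ∧
              pvHAt heights tr tc ≥ pvHAt heights r c then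
            pvDfs heights m n fuel tr tc w else w) tr tc = true) := by
      intro tr tc w hmem hOK
      obtain ⟨o1, o2, o3, o4, o5, o6, o7⟩ := hOK
      by_cases hg : 0 ≤ tr ∧ tr < m ∧ 0 ≤ tc ∧ tc < n ∧ pvVAt w tr tc = false ∧
          pvHAt heights tr tc ≥ pvHAt heights r c
      · rw [if_pos hg]
        have hinT : pvInR m n (tr, tc) := ⟨hg.1, hg.2.1, hg.2.2.1, hg.2.2.2.1⟩
        have hneW : (tr, tc) ≠ W := by
          intro he
          have h1 : tr = W.1 := by rw [← he]
          have h2 : tc = W.2 := by rw [← he]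
          rw [h1, h2, o3] at hg
          exact absurd hg.2.2.2.2.1 (by simp)
        have hbase : pvReachW heights m n s W (r, c) := by
          rcases Hrc with he | ⟨_, _, hreach, _⟩
          · exact he ▸ pvReachW.refl
          · exact hreach
        have hcond : (r, c) = s ∨ (r, c) ≠ W := by
          rcases Hrc with he | ⟨hne, _, _, _⟩
          · exact Or.inl he
          · exact Or.inr hne
        have hadjT : pvAdj heights m n (r, c) (tr, tc) := ⟨hmem, hinT, hg.2.2.2.2.2⟩
        obtain ⟨d1, d2, d3, d4, d5, d6, d7, d8⟩ := ih tr tc w o1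
          (Or.inr ⟨hneW, hinT, pvReachW.step hbase hcond hadjT, o3⟩)
          hg.2.2.2.2.1 o5 (by omega)
        refine ⟨⟨d1, fun p hp hv => d2 p hp (o2 p hp hv), d3,
          fun hrc => d2 (r, c) hrc (o4 hrc), d5, by omega, ?_⟩, d2, fun _ => d4 hinT⟩
        intro p hp hm
        rcases d8 p hp hm with hw | hW | hcl
        · rcases o7 p hp hw with h | h | h | h
          · exact Or.inl h
          · exact Or.inr (Or.inl h)
          · exact Or.inr (Or.inr (Or.inl h))
          · exact Or.inr (Or.inr (Or.inr (fun q hq => d2 q hq.2.1 (h q hq))))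
        · exact Or.inr (Or.inl hW)
        · exact Or.inr (Or.inr (Or.inr hcl))
      · rw [if_neg hg]
        refine ⟨⟨o1, o2, o3, o4, o5, o6, o7⟩, fun p _ hv => hv, ?_⟩
        intro hadj
        rcases hadj with ⟨_, hinT, hh⟩
        obtain ⟨ha, hb, hc, hd⟩ : 0 ≤ tr ∧ tr < m ∧ 0 ≤ tc ∧ tc < n :=
          ⟨hinT.1, hinT.2.1, hinT.2.2.1, hinT.2.2.2⟩
        rcases Bool.eq_false_or_eq_true (pvVAt w tr tc) with hv | hv
        · exact hv
        · exact absurd ⟨ha, hb, hc, hd, hv, hh⟩ hg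
    obtain ⟨K1, M1, A1⟩ := hstep (r - 1) c (pvVSet v r c) (by simp [pvNbrs]) hOK0
    obtain ⟨K2, M2, A2⟩ := hstep (r + 1) c _ (by simp [pvNbrs]) K1
    obtain ⟨K3, M3, A3⟩ := hstep r (c - 1) _ (by simp [pvNbrs]) K2
    obtain ⟨K4, M4, A4⟩ := hstep r (c + 1) _ (by simp [pvNbrs]) K3
    obtain ⟨F1, F2, F3, F4, F5, F6, F7⟩ := K4
    have hadjAll : ∀ q, pvAdj heights m n (r, c) q →
        pvVAt (pvDfs heights m n (fuel + 1) r c v) q.1 q.2 = true := by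
      intro q hadj
      have hmem := hadj.1
      have hinq := hadj.2.1
      simp only [pvNbrs, List.mem_cons, List.not_mem_nil, or_false] at hmem
      rcases hmem with he | he | he | he <;> subst he
      · exact M4 _ hinq (M3 _ hinq (M2 _ hinq (A1 hadj)))
      · exact M4 _ hinq (M3 _ hinq (A2 hadj))
      · exact M4 _ hinq (A3 hadj)
      · exact A4 hadj
    refine ⟨F1, F2, F3, fun hrc => F4 hrc, F5, F6, hadjAll, ?_⟩
    intro p hp hm
    rcases F7 p hp hm with h | h | h | h
    · exact Or.inl h
    · exact Or.inr (Or.inl h)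
    · exact Or.inr (Or.inr (fun q hq => hadjAll q (h ▸ hq)))
    · exact Or.inr (Or.inr h)

theorem pvReachGridB_spec (heights : List (List Int)) (m n : Int) (r0 c0 : Int)
    (hm : 0 < m) (hn : 0 < n) (hr0 : -m ≤ r0) (hr1 : r0 < m) (hc0 : -n ≤ c0) (hc1 : c0 < n) :
    ∀ p : Int × Int, pvInR m n p →
      (pvVAt (pvReachGridB heights m n r0 c0) p.1 p.2 = true ↔
        (p = (pvWrap m r0, pvWrap n c0) ∨
          pvReachW heights m n (r0, c0) (pvWrap m r0, pvWrap n c0) p)) := by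
  intro p hp
  have hWIn : pvInR m n (pvWrap m r0, pvWrap n c0) := pvWrap_inR m n hr0 hr1 hc0 hc1 hm hn
  have hsW : pvInR m n (r0, c0) → (r0, c0) = (pvWrap m r0, pvWrap n c0) := by
    intro h
    rw [pvWrap_id m h.1, pvWrap_id n h.2.2.1]
  have hVS : ∀ v : List (List Bool), pvShape m n v →
      pvVSet v (r0, c0).1 (r0, c0).2
        = pvVSet v (pvWrap m r0, pvWrap n c0).1 (pvWrap m r0, pvWrap n c0).2 :=
    fun v hv => pvVSet_wrap m n v hv hr0 hr1 hc0 hc1 hm hn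
  have hVA : ∀ v : List (List Bool), pvShape m n v →
      pvVAt v (r0, c0).1 (r0, c0).2
        = pvVAt v (pvWrap m r0, pvWrap n c0).1 (pvWrap m r0, pvWrap n c0).2 :=
    fun v hv => pvVAt_wrap m n v hv hr0 hr1 hc0 hc1 hm hn
  have hinv0 : ∀ q : Int × Int, pvInR m n q →
      pvVAt (List.replicate m.toNat (List.replicate n.toNat false)) q.1 q.2 = true →
      q = (pvWrap m r0, pvWrap n c0) ∨
        pvReachW heights m n (r0, c0) (pvWrap m r0, pvWrap n c0) q := by
    intro q _ hq
    rw [pvVAt_replicate] at hq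
    cases hq
  obtain ⟨d1, d2, d3, d4, d5, d6, d7, d8⟩ :=
    pvDfs_spec heights m n (r0, c0) (pvWrap m r0, pvWrap n c0) hWIn hsW hVS hVA
      (m.toNat * n.toNat + 1) r0 c0
      (List.replicate m.toNat (List.replicate n.toNat false))
      (pvShape_replicate m n) (Or.inl rfl) (pvVAt_replicate m n r0 c0) hinv0
      (by rw [pvCnt_replicate]; omega)
  unfold pvReachGridB
  constructor
  · exact d5 p hp
  · intro hr
    have key : ∀ x, pvReachW heights m n (r0, c0) (pvWrap m r0, pvWrap n c0) x →
        x = (r0, c0) ∨ (pvInR m n x ∧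
          pvVAt (pvDfs heights m n (m.toNat * n.toNat + 1) r0 c0
            (List.replicate m.toNat (List.replicate n.toNat false))) x.1 x.2 = true) := by
      intro x hx
      induction hx with
      | refl => exact Or.inl rfl
      | step hr' hcond hadj ihx =>
        right
        refine ⟨hadj.2.1, ?_⟩
        rcases ihx with he | ⟨hinq, hmq⟩
        · exact d7 _ (he ▸ hadj)
        · rcases d8 _ hinq hmq with hv | hW | hcl
          · rw [pvVAt_replicate] at hv
            cases hv
          · rcases hcond with he | hne
            · exact d7 _ (he ▸ hadj)
            · exact absurd hW hne
          · exact hcl _ hadj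
    rcases hr with he | hr
    · rw [he]
      exact d3
    · rcases key p hr with he | ⟨_, hm⟩
      · rw [he]
        exact d4 (he ▸ hp)
      · exact hm

-- the two final scans agree cell by cell
theorem pvScan_eq (heights : List (List Int)) (m n : Int)
    (v1 v2 w1 w2 : List (List Bool))
    (h1 : ∀ p : Int × Int, pvInR m n p → (pvVAt v1 p.1 p.2 = true ↔ pvVAt w1 p.1 p.2 = true))
    (h2 : ∀ p : Int × Int, pvInR m n p → (pvVAt v2 p.1 p.2 = true ↔ pvVAt w2 p.1 p.2 = true)) :
    pvScanA heights m n v1 v2 = pvScanB heights m n w1 w2 := by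
  unfold pvScanA pvScanB
  apply PySem.List.foldl_congr_mem
  intro acc i hi
  apply PySem.List.foldl_congr_mem
  intro acc' j hj
  have hij : pvInR m n (i, j) := by
    have h1' := PySem.List.mem_pyRange_one.mp hi
    have h2' := PySem.List.mem_pyRange_one.mp hj
    exact ⟨h1'.1, h1'.2, h2'.1, h2'.2⟩
  have e1 := h1 (i, j) hij
  have e2 := h2 (i, j) hij
  by_cases hv1 : pvVAt v1 i j = true
  · by_cases hv2 : pvVAt v2 i j = true
    · by_cases hh : pvHAt heights i j > acc'.1
      · rw [if_pos ⟨hv1, hv2⟩, if_pos hh, if_pos ⟨e1.mp hv1, e2.mp hv2, hh⟩]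
      · rw [if_pos ⟨hv1, hv2⟩, if_neg hh, if_neg (fun hc => hh hc.2.2)]
    · rw [if_neg (fun hc => hv2 hc.2), if_neg (fun hc => hv2 (e2.mpr hc.2.1))]
  · rw [if_neg (fun hc => hv1 hc.1), if_neg (fun hc => hv1 (e1.mpr hc.1))]

-- ===== VERDICT (by name: the statement is the Claim_ definition above) =====
theorem find_highest_water_tower_spec : Claim_equal_find_highest_water_tower := by
  intro heights town1 town2 _ hpre
  unfold Spec_find_highest_water_tower
  obtain ⟨hne, hrect, hl1, hl2, hb1, hb2, hb3, hb4, hb5, hb6, hb7, hb8⟩ := hpre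
  obtain ⟨row0, rest, hrow⟩ : ∃ row0 rest, heights = row0 :: rest := by
    cases heights with
    | nil => exact absurd rfl hne
    | cons a t => exact ⟨a, t, rfl⟩
  obtain ⟨r1, c1, ht1⟩ := List.length_eq_two.mp hl1
  obtain ⟨r2, c2, ht2⟩ := List.length_eq_two.mp hl2
  subst hrow ht1 ht2
  have hb1' : -((row0 :: rest).length : Int) ≤ r1 := hb1
  have hb2' : r1 < ((row0 :: rest).length : Int) := hb2
  have hb3' : -(row0.length : Int) ≤ c1 := hb3
  have hb4' : c1 < (row0.length : Int) := hb4
  have hb5' : -((row0 :: rest).length : Int) ≤ r2 := hb5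
  have hb6' : r2 < ((row0 :: rest).length : Int) := hb6
  have hb7' : -(row0.length : Int) ≤ c2 := hb7
  have hb8' : c2 < (row0.length : Int) := hb8
  have hm : (0 : Int) < ((row0 :: rest).length : Int) := by
    simp only [List.length_cons]
    push_cast
    omega
  have hn : (0 : Int) < (row0.length : Int) := by omega
  have hs0 : pvShape ((row0 :: rest).length : Int) (row0.length : Int)
      (List.replicate ((row0 :: rest).length : Int).toNat
        (List.replicate (row0.length : Int).toNat false)) :=
    pvShape_replicate _ _
  have e : find_highest_water_tower_alt (row0 :: rest) [r1, c1] [r2, c2]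
      = (pvScanB (row0 :: rest) ((row0 :: rest).length : Int) (row0.length : Int)
          (pvReachGridB (row0 :: rest) ((row0 :: rest).length : Int) (row0.length : Int) r1 c1)
          (pvReachGridB (row0 :: rest) ((row0 :: rest).length : Int) (row0.length : Int) r2 c2)).2 := by
    simp [find_highest_water_tower_alt]
  rw [e]
  simp only [find_highest_water_tower]
  have h1 := fun (p : Int × Int)
      (hp : pvInR ((row0 :: rest).length : Int) (row0.length : Int) p) =>
    (pvBfs_spec (row0 :: rest) ((row0 :: rest).length : Int) (row0.length : Int)
      (r1, c1) (pvWrap ((row0 :: rest).length : Int) r1, pvWrap (row0.length : Int) c1)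
      (pvWrap_inR _ _ hb1' hb2' hb3' hb4' hm hn)
      (fun h => by
        have e1 := pvWrap_id ((row0 :: rest).length : Int) h.1
        have e2 := pvWrap_id (row0.length : Int) h.2.2.1
        rw [e1, e2])
      (pvVSet_wrap _ _ _ hs0 hb1' hb2' hb3' hb4' hm hn) p hp).trans
    (pvReachGridB_spec (row0 :: rest) _ _ r1 c1 hm hn hb1' hb2' hb3' hb4' p hp).symm
  have h2 := fun (p : Int × Int)
      (hp : pvInR ((row0 :: rest).length : Int) (row0.length : Int) p) =>
    (pvBfs_spec (row0 :: rest) ((row0 :: rest).length : Int) (row0.length : Int)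
      (r2, c2) (pvWrap ((row0 :: rest).length : Int) r2, pvWrap (row0.length : Int) c2)
      (pvWrap_inR _ _ hb5' hb6' hb7' hb8' hm hn)
      (fun h => by
        have e1 := pvWrap_id ((row0 :: rest).length : Int) h.1
        have e2 := pvWrap_id (row0.length : Int) h.2.2.1
        rw [e1, e2])
      (pvVSet_wrap _ _ _ hs0 hb5' hb6' hb7' hb8' hm hn) p hp).trans
    (pvReachGridB_spec (row0 :: rest) _ _ r2 c2 hm hn hb5' hb6' hb7' hb8' p hp).symm
  rw [pvScan_eq _ _ _ _ _ _ _ h1 h2]
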